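-- pv_equiv track=rewrite | github.com/elsianAI/4_0-ELSIAN-INVEST | elsian/assemble/source_map.py | _iter_table_blocks
-- ===== SOURCE A (Python) =====
-- def _iter_table_blocks(lines: list[str]) -> list[tuple[int, int, list[str]]]:
--     blocks: list[tuple[int, int, list[str]]] = []
--     block_start: int | None = None
--     block_lines: list[str] = []
--
--     for line_no, line in enumerate(lines, start=1):
--         is_table_line = line.startswith("|") and line.endswith("|")
--         if is_table_line:
--             if block_start is None:
--                 block_start = line_no
--                 block_lines = []
--             block_lines.append(line)
--             continue
--
--         if block_start is not None:
--             blocks.append((block_start, line_no - 1, block_lines))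
--             block_start = None
--             block_lines = []
--
--     if block_start is not None:
--         blocks.append((block_start, len(lines), block_lines))
--
--     return blocks
-- ===== SOURCE B (Python) =====
-- def _iter_table_blocks(lines: list[str]) -> list[tuple[int, int, list[str]]]:
--     def is_table(line: str) -> bool:
--         return line.startswith("|") and line.endswith("|")
--
--     blocks: list[tuple[int, int, list[str]]] = []
--     i, n = 0, len(lines)
--     while i < n:
--         if is_table(lines[i]):
--             j = i
--             while j < n and is_table(lines[j]):
--                 j += 1
--             blocks.append((i + 1, j, lines[i:j]))
--             i = j
--         else:
--             i += 1
--     return blocks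
-- ===== Notes on version B (the rewrite author's own statement) =====
-- stated objective: alternative
-- what changed: Replaces A's stateful block_start/block_lines flag loop with a run-scanning index loop: each maximal run of table lines is located with an inner scan, sliced out, and emitted in one step, removing the open-block state and the trailing flush.
import Mathlib
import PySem

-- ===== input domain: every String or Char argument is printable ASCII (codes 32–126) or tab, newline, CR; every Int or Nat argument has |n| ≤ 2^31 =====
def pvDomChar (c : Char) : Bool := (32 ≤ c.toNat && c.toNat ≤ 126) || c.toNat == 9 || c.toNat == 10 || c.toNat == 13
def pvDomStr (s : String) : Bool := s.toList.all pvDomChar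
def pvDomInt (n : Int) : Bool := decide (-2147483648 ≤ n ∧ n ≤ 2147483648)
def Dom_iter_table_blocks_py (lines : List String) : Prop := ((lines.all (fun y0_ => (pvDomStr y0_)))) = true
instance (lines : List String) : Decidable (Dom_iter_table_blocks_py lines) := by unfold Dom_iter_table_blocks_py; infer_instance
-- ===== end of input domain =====

-- B replaces A's stateful open-block flag loop with a run-scan that emits each maximal
-- run of table lines in one step (objective: alternative decomposition, same cost).


-- ===== PORT A =====
-- the for-loop of A: state (blocks, block_start, block_lines), line_no counts from 1
def iterA_loop (rest : List String) (line_no : Int)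
    (st : List (Int × Int × List String) × Option Int × List String) :
    List (Int × Int × List String) × Option Int × List String :=
  match rest with
  | [] => st
  | line :: rest' =>
    let (blocks, block_start, block_lines) := st
    if PySem.Str.startswith line "|" && PySem.Str.endswith line "|" then
      match block_start with
      | none => iterA_loop rest' (line_no + 1) (blocks, some line_no, [line])
      | some s => iterA_loop rest' (line_no + 1) (blocks, some s, block_lines ++ [line])
    else
      match block_start with
      | some s => iterA_loop rest' (line_no + 1) (blocks ++ [(s, line_no - 1, block_lines)], none, [])
      | none => iterA_loop rest' (line_no + 1) (blocks, none, [])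

def iter_table_blocks_py (lines : List String) : List (Int × Int × List String) :=
  let st := iterA_loop lines 1 ([], none, [])
  match st.2.1 with
  | some s => st.1 ++ [(s, (lines.length : Int), st.2.2)]
  | none => st.1

-- ===== PORT B =====
def isTableLineB (line : String) : Bool :=
  PySem.Str.startswith line "|" && PySem.Str.endswith line "|"

-- run-scan: the inner `while` of Source B is the takeWhile of the run, the slice is the run itself
def iterB_go (rest : List String) (n : Int) : List (Int × Int × List String) :=
  match rest with
  | [] => []
  | l :: rest' =>
    if isTableLineB l then
      let run := l :: rest'.takeWhile isTableLineB
      (n, n + run.length - 1, run) :: iterB_go (rest'.dropWhile isTableLineB) (n + run.length)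
    else
      iterB_go rest' (n + 1)
termination_by rest.length
decreasing_by
  · simpa using Nat.lt_succ_of_le (rest'.length_dropWhile_le isTableLineB)
  · simp

def iter_table_blocks_py_alt (lines : List String) : List (Int × Int × List String) :=
  iterB_go lines 1

-- ===== PRECONDITION & SPEC =====
def Spec_iter_table_blocks_py (lines : List String) (out : List (Int × Int × List String)) : Prop := out = iter_table_blocks_py_alt lines
instance (lines : List String) (out : List (Int × Int × List String)) : Decidable (Spec_iter_table_blocks_py lines out) := by unfold Spec_iter_table_blocks_py; infer_instance

-- ===== CLAIM (what is proved, stated in full; the proofs are below) =====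
def Claim_equal_iter_table_blocks_py : Prop := ∀ (lines : List String), Dom_iter_table_blocks_py lines → Spec_iter_table_blocks_py lines (iter_table_blocks_py lines)

-- ===== LEMMAS AND PROOFS =====

-- flush of A's final state, parameterised by the end line number L
def iterA_finish (st : List (Int × Int × List String) × Option Int × List String) (L : Int) :
    List (Int × Int × List String) :=
  match st.2.1 with
  | some s => st.1 ++ [(s, L, st.2.2)]
  | none => st.1

-- combined invariant, by induction on a length bound (the two cases hand off to each other):
-- CLOSED: from a closed state A's loop produces exactly B's run-scan output;
-- OPEN: from an open block (start s, collected bl) A closes it at the end of the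
-- current run of table lines and then proceeds like B.
theorem iterAB_inv (k : Nat) : ∀ (ls : List String), ls.length ≤ k →
    (∀ (n : Int) (acc : List (Int × Int × List String)),
      iterA_finish (iterA_loop ls n (acc, none, [])) (n - 1 + ls.length) =
        acc ++ iterB_go ls n) ∧
    (∀ (n s : Int) (acc : List (Int × Int × List String)) (bl : List String),
      iterA_finish (iterA_loop ls n (acc, some s, bl)) (n - 1 + ls.length) =
        acc ++ (s, n - 1 + ((ls.takeWhile isTableLineB).length : Int),
                bl ++ ls.takeWhile isTableLineB)
            :: iterB_go (ls.dropWhile isTableLineB) (n + (ls.takeWhile isTableLineB).length)) := by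
  induction k with
  | zero =>
    intro ls hls
    have : ls = [] := List.eq_nil_of_length_eq_zero (Nat.le_zero.mp hls)
    subst this
    constructor
    · intro n acc; simp [iterA_loop, iterA_finish, iterB_go]
    · intro n s acc bl; simp [iterA_loop, iterA_finish, iterB_go]
  | succ k ih =>
    intro ls hls
    match ls with
    | [] =>
      constructor
      · intro n acc; simp [iterA_loop, iterA_finish, iterB_go]
      · intro n s acc bl; simp [iterA_loop, iterA_finish, iterB_go]
    | l :: rest =>
      have hrest : rest.length ≤ k := by simpa using Nat.lt_succ_iff.mp (Nat.lt_of_lt_of_le (by simp) hls)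
      constructor
      · -- CLOSED case
        intro n acc
        by_cases h : isTableLineB l = true
        · have hA : (PySem.Str.startswith l "|" && PySem.Str.endswith l "|") = true := h
          rw [iterA_loop]
          simp only [hA, reduceIte]
          have := (ih rest hrest).2 (n + 1) n acc [l]
          have harith : (n + 1) - 1 + ((rest.length : Int)) = n - 1 + ((l :: rest).length : Int) := by
            simp only [List.length_cons]; push_cast; ring
          rw [harith] at this
          rw [this, iterB_go]
          simp only [h, reduceIte]
          have e2 : n + 1 - 1 + (((rest.takeWhile isTableLineB).length : Int)) =
              n + (((l :: rest.takeWhile isTableLineB).length : Int)) - 1 := by simp only [List.length_cons]; push_cast; ring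
          have e3 : n + 1 + (((rest.takeWhile isTableLineB).length : Int)) =
              n + (((l :: rest.takeWhile isTableLineB).length : Int)) := by simp only [List.length_cons]; push_cast; ring
          rw [e2, e3]
          simp
        · have hA : (PySem.Str.startswith l "|" && PySem.Str.endswith l "|") = false :=
            Bool.eq_false_iff.mpr h
          rw [iterA_loop]
          simp only [hA, Bool.false_eq_true, reduceIte]
          have := (ih rest hrest).1 (n + 1) acc
          have harith : (n + 1) - 1 + ((rest.length : Int)) = n - 1 + ((l :: rest).length : Int) := by
            simp only [List.length_cons]; push_cast; ring
          rw [harith] at this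
          rw [this, iterB_go]
          simp only [h, Bool.false_eq_true, reduceIte]
      · -- OPEN case
        intro n s acc bl
        by_cases h : isTableLineB l = true
        · have hA : (PySem.Str.startswith l "|" && PySem.Str.endswith l "|") = true := h
          rw [iterA_loop]
          simp only [hA, reduceIte, List.takeWhile_cons_of_pos h, List.dropWhile_cons_of_pos h]
          have := (ih rest hrest).2 (n + 1) s acc (bl ++ [l])
          have harith : (n + 1) - 1 + ((rest.length : Int)) = n - 1 + ((l :: rest).length : Int) := by
            simp only [List.length_cons]; push_cast; ring
          rw [harith] at this
          rw [this]
          have e2 : n + 1 - 1 + (((rest.takeWhile isTableLineB).length : Int)) =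
              n - 1 + (((l :: rest.takeWhile isTableLineB).length : Int)) := by simp only [List.length_cons]; push_cast; ring
          have e3 : n + 1 + (((rest.takeWhile isTableLineB).length : Int)) =
              n + (((l :: rest.takeWhile isTableLineB).length : Int)) := by simp only [List.length_cons]; push_cast; ring
          rw [e2, e3]
          simp
        · have hf : isTableLineB l = false := Bool.eq_false_iff.mpr h
          have hA : (PySem.Str.startswith l "|" && PySem.Str.endswith l "|") = false := hf
          rw [iterA_loop]
          simp only [hA, Bool.false_eq_true, reduceIte,
            List.takeWhile_cons_of_neg h, List.dropWhile_cons_of_neg h]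
          have := (ih rest hrest).1 (n + 1) (acc ++ [(s, n - 1, bl)])
          have harith : (n + 1) - 1 + ((rest.length : Int)) = n - 1 + ((l :: rest).length : Int) := by
            simp only [List.length_cons]; push_cast; ring
          rw [harith] at this
          rw [this, iterB_go]
          simp [hf]

-- ===== VERDICT (by name: the statement is the Claim_ definition above) =====
theorem iter_table_blocks_py_spec : Claim_equal_iter_table_blocks_py := by
  intro lines _
  unfold Spec_iter_table_blocks_py iter_table_blocks_py iter_table_blocks_py_alt
  have h := (iterAB_inv lines.length lines (le_refl _)).1 1 []
  have harith : (1 : Int) - 1 + (lines.length : Int) = (lines.length : Int) := by ring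
  rw [harith] at h
  simpa [iterA_finish] using h
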